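-- pv_equiv track=rewrite | github.com/zzzAdmiral/AoC2023 | advent14.py | eastWest
-- ===== SOURCE A (Python) =====
-- def eastWest(matrix, west):
--     for i, row in enumerate(matrix):
--         # row = ''.join(row)
--         gaps = row.split('#')
--         updated_row = []
--         for gap in gaps:
--             gap = sorted(gap, reverse=west)
--             updated_row.append(''.join(gap))
--         updated_row = '#'.join(updated_row)
--         matrix[i] = updated_row
--     return matrix
-- ===== SOURCE B (Python) =====
-- def eastWest(matrix, west):
--     for i, row in enumerate(matrix):
--         matrix[i] = '#'.join(
--             ''.join(c * gap.count(c) for c in sorted(set(gap), reverse=west))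
--             for gap in row.split('#'))
--     return matrix
-- ===== Notes on version B (the rewrite author's own statement) =====
-- stated objective: alternative
-- what changed: Instead of sorting every character of a '#'-segment, B counts occurrences per distinct character (set + C-level str.count) and emits one repeated block per distinct character in ascending/descending order; same cost class overall, it trades the full multiset sort for counting over the (small) character alphabet.
import Mathlib
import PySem

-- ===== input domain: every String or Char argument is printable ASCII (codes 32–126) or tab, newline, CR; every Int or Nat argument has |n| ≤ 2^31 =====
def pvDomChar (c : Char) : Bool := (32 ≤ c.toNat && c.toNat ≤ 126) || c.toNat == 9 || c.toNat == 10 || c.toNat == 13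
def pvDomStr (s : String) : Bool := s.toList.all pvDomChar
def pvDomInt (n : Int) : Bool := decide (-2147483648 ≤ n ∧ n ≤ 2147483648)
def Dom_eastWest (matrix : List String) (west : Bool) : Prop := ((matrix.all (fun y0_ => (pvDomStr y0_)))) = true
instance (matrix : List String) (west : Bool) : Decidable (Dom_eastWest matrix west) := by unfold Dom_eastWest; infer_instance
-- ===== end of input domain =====

-- B replaces A's per-segment multiset sort by counting: per '#'-segment it counts each
-- distinct character and emits one repeated block per character in order; both Pythons
-- mutate `matrix` in place — the equivalence proved here is about the return value.


-- ===== PORT A =====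
-- for each row: split on '#', sorted(gap, reverse=west) per gap, '#'.join
def eastWest (matrix : List String) (west : Bool) : List String :=
  matrix.map (fun row =>
    String.ofList (PySem.Chars.join ['#']
      ((PySem.Chars.splitOn row.toList ['#']).map
        (fun gap => PySem.List.sorted gap (fun c => c) west))))

-- ===== PORT B =====
-- ''.join(c * gap.count(c) for c in sorted(set(gap), reverse=west))
def pvCountBlocks (gap : List Char) (west : Bool) : List Char :=
  (PySem.List.sorted (PySem.Set.ofList gap) (fun c => c) west).flatMap
    (fun c => List.replicate (gap.count c) c)

def eastWest_alt (matrix : List String) (west : Bool) : List String :=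
  matrix.map (fun row =>
    String.ofList (PySem.Chars.join ['#']
      ((PySem.Chars.splitOn row.toList ['#']).map
        (fun gap => pvCountBlocks gap west))))

-- ===== PRECONDITION & SPEC =====
def Spec_eastWest (matrix : List String) (west : Bool) (out : List String) : Prop := out = eastWest_alt matrix west
instance (matrix : List String) (west : Bool) (out : List String) : Decidable (Spec_eastWest matrix west out) := by unfold Spec_eastWest; infer_instance

-- ===== CLAIM (what is proved, stated in full; the proofs are below) =====
def Claim_equal_eastWest : Prop := ∀ (matrix : List String) (west : Bool), Dom_eastWest matrix west → Spec_eastWest matrix west (eastWest matrix west)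

-- ===== LEMMAS AND PROOFS =====

theorem sum_map_indicator (ds : List Char) (k : Char) (g : Char → Nat)
    (h : ∀ j ∈ ds, j ≠ k → g j = 0) : (ds.map g).sum = ds.count k * g k := by
  induction ds with
  | nil => simp
  | cons j t ih =>
    have ht : ∀ i ∈ t, i ≠ k → g i = 0 := fun i hi => h i (List.mem_cons_of_mem _ hi)
    by_cases hjk : j = k
    · subst hjk; simp [ih ht]; ring
    · simp [ih ht, hjk, h j List.mem_cons_self hjk]

theorem count_flatMap_replicate (ds : List Char) (n : Char → Nat) (x : Char) :
    (ds.flatMap (fun c => List.replicate (n c) c)).count x = ds.count x * n x := by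
  rw [List.count_flatMap]
  rw [sum_map_indicator ds x (fun j => (List.count x ∘ fun c => List.replicate (n c) c) j)
    (fun j _ hne => by simp [List.count_replicate, hne])]
  simp

theorem flat_pairwise (R : Char → Char → Prop) (ds : List Char) (n : Char → Nat)
    (hrefl : ∀ c ∈ ds, R c c) (hord : ds.Pairwise R) :
    (ds.flatMap (fun c => List.replicate (n c) c)).Pairwise R := by
  induction ds with
  | nil => simp
  | cons j t ih =>
    have ht := ih (fun i hi => hrefl i (List.mem_cons_of_mem _ hi)) hord.tail
    rw [List.flatMap_cons, List.pairwise_append]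
    refine ⟨List.pairwise_replicate.2 (Or.inr (hrefl j List.mem_cons_self)), ht, ?_⟩
    intro a ha b hb
    rw [List.eq_of_mem_replicate ha]
    rcases List.mem_flatMap.1 hb with ⟨i, hi, hbi⟩
    rw [List.eq_of_mem_replicate hbi]
    exact (List.pairwise_cons.1 hord).1 i hi

theorem blocks_perm (cs : List Char) (west : Bool) : (pvCountBlocks cs west).Perm cs := by
  rw [List.perm_iff_count]
  intro x
  unfold pvCountBlocks
  rw [count_flatMap_replicate]
  have hnd : (PySem.List.sorted (PySem.Set.ofList cs) (fun c => c) west).Nodup :=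
    (PySem.List.sorted_perm (PySem.Set.ofList cs) (fun c => c) west).nodup_iff.2
      (PySem.Set.nodup_ofList cs)
  by_cases hx : x ∈ cs
  · have hmem : x ∈ PySem.List.sorted (PySem.Set.ofList cs) (fun c => c) west :=
      (PySem.List.mem_sorted _ _ _ _).2 ((PySem.Set.mem_ofList _ _).2 hx)
    rw [List.count_eq_one_of_mem hnd hmem, one_mul]
  · have h1 : (PySem.List.sorted (PySem.Set.ofList cs) (fun c => c) west).count x = 0 := by
      rw [List.count_eq_zero]
      intro hmem
      exact hx ((PySem.Set.mem_ofList _ _).1 ((PySem.List.mem_sorted _ _ _ _).1 hmem))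
    rw [h1, List.count_eq_zero.2 hx, Nat.zero_mul]

-- counting blocks emit exactly what Python's stable sorted() returns
theorem gap_eq (cs : List Char) (west : Bool) :
    PySem.List.sorted cs (fun c => c) west = pvCountBlocks cs west := by
  cases west with
  | false =>
    exact PySem.List.sorted_id_eq_of_perm_of_pairwise cs _
      (blocks_perm cs false)
      (flat_pairwise (· ≤ ·) _ _ (fun c _ => le_refl c)
        (PySem.List.sorted_pairwise (PySem.Set.ofList cs) (fun c => c)))
  | true =>
    refine List.Perm.eq_of_pairwise (le := fun a b => b ≤ a)
      (fun a b _ _ hab hba => le_antisymm hba hab)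
      (PySem.List.sorted_pairwise_rev cs (fun c => c))
      (flat_pairwise (fun a b => b ≤ a) _ _ (fun c _ => le_refl c)
        (PySem.List.sorted_pairwise_rev (PySem.Set.ofList cs) (fun c => c)))
      ((PySem.List.sorted_perm cs (fun c => c) true).trans (blocks_perm cs true).symm)

-- ===== VERDICT (by name: the statement is the Claim_ definition above) =====
theorem eastWest_spec : Claim_equal_eastWest := by
  intro matrix west _
  unfold Spec_eastWest eastWest eastWest_alt
  apply List.map_congr_left
  intro row _
  congr 1
  congr 1
  apply List.map_congr_left
  intro gap _
  exact gap_eq gap west
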